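-- pv_equiv track=rewrite | github.com/VarenyaJ/P6 | loinc_fetal_biometry_remote_query.py | _loincish_variants_for_family
-- ===== SOURCE A (Python) =====
-- from typing import List, Dict, Any, Optional, Tuple, Set
--
-- def _loincish_variants_for_family(user_term: str, normalized: str) -> List[str]:
--     """Family-specific seed phrases that align with LOINC display conventions.
--
--     Parameters
--     ----------
--     user_term : str
--         Original term as typed by the user.
--     normalized : str
--         Normalized term.
--
--     Returns
--     -------
--     list of str
--         Candidate phrase variants specific to certain measurement families.
--     """
--     terms: List[str] = []
--     ln = normalized.lower()
--     lu = user_term.lower()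
--
--     if "biparietal diameter" in ln or "bpd" in lu:
--         terms += [
--             "Head Diameter.biparietal [Length] fetus US",
--             "Head biparietal diameter [Length] fetus US",
--             "Fetal head biparietal diameter [Length] US",
--         ]
--     if "head circumference" in ln or "hc" in lu:
--         terms += ["Head [Circumference] fetus US"]
--     if "abdominal circumference" in ln or "ac" in lu:
--         terms += [
--             "Abdomen [Circumference] fetus US",
--             "Abdominal circumference fetus US",
--         ]
--
--     for b in ["femur", "humerus", "radius", "ulna", "tibia", "fibula"]:
--         if b in ln or b in lu:
--             terms += [
--                 f"{b.title()} diaphysis fetus [Length] US",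
--                 f"Fetal {b} length [Length] US",
--             ]
--             break
--
--     if "cerebellum" in ln:
--         terms += [
--             "Cerebellum fetus [Diameter] US",
--             "Cerebellum Diameter transverse fetus US",
--         ]
--     if "cisterna magna" in ln:
--         terms += [
--             "Cisterna magna fetus [Diameter] US",
--             "Fetal cisterna magna sagittal diameter US",
--         ]
--
--     if "estimated fetal weight" in ln or "efw" in lu:
--         terms += [
--             "Estimated fetal weight [Mass] US",
--             "Fetal body weight [Mass] US",
--             "Fetus body weight [Mass] US",
--             "EFW [Mass] US",
--         ]
--
--     if "fetal heart rate" in ln or "fhr" in lu: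
--         terms += [
--             "Fetal heart rate [Rate] US",
--             "Fetal heart rate US",
--             "Fetal heart rate by auscultation",
--             "Fetal heart rate mean 10 minutes",
--             "Fetal heart rate reactivity",
--         ]
--     return terms
-- ===== SOURCE B (Python) =====
-- from typing import List, Tuple
--
-- # Flat trigger index: (substring, source, family); source "n" = lowered normalized, "u" = lowered user term.
-- _TRIGGERS: List[Tuple[str, str, str]] = [
--     ("biparietal diameter", "n", "bpd"), ("bpd", "u", "bpd"),
--     ("head circumference", "n", "hc"), ("hc", "u", "hc"),
--     ("abdominal circumference", "n", "ac"), ("ac", "u", "ac"),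
--     ("cerebellum", "n", "cereb"),
--     ("cisterna magna", "n", "cm"),
--     ("estimated fetal weight", "n", "efw"), ("efw", "u", "efw"),
--     ("fetal heart rate", "n", "fhr"), ("fhr", "u", "fhr"),
--     ("femur", "n", "bone"), ("femur", "u", "bone"),
--     ("humerus", "n", "bone"), ("humerus", "u", "bone"),
--     ("radius", "n", "bone"), ("radius", "u", "bone"),
--     ("ulna", "n", "bone"), ("ulna", "u", "bone"),
--     ("tibia", "n", "bone"), ("tibia", "u", "bone"),
--     ("fibula", "n", "bone"), ("fibula", "u", "bone"),
-- ]
--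
-- # Flat phrase table in emission order; bone phrases are templates over the matched bone.
-- _PHRASES: List[Tuple[str, str]] = [
--     ("bpd", "Head Diameter.biparietal [Length] fetus US"),
--     ("bpd", "Head biparietal diameter [Length] fetus US"),
--     ("bpd", "Fetal head biparietal diameter [Length] US"),
--     ("hc", "Head [Circumference] fetus US"),
--     ("ac", "Abdomen [Circumference] fetus US"),
--     ("ac", "Abdominal circumference fetus US"),
--     ("bone", "{T} diaphysis fetus [Length] US"),
--     ("bone", "Fetal {b} length [Length] US"),
--     ("cereb", "Cerebellum fetus [Diameter] US"),
--     ("cereb", "Cerebellum Diameter transverse fetus US"),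
--     ("cm", "Cisterna magna fetus [Diameter] US"),
--     ("cm", "Fetal cisterna magna sagittal diameter US"),
--     ("efw", "Estimated fetal weight [Mass] US"),
--     ("efw", "Fetal body weight [Mass] US"),
--     ("efw", "Fetus body weight [Mass] US"),
--     ("efw", "EFW [Mass] US"),
--     ("fhr", "Fetal heart rate [Rate] US"),
--     ("fhr", "Fetal heart rate US"),
--     ("fhr", "Fetal heart rate by auscultation"),
--     ("fhr", "Fetal heart rate mean 10 minutes"),
--     ("fhr", "Fetal heart rate reactivity"),
-- ]
--
-- _BONES = ("femur", "humerus", "radius", "ulna", "tibia", "fibula")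
--
--
-- def _loincish_variants_for_family(user_term: str, normalized: str) -> List[str]:
--     ln = normalized.lower()
--     lu = user_term.lower()
--     fired = {fam for sub, src, fam in _TRIGGERS if sub in (ln if src == "n" else lu)}
--     bone = next((b for b in _BONES if b in ln or b in lu), "")
--     return [p.replace("{T}", bone.title()).replace("{b}", bone) if fam == "bone" else p
--             for fam, p in _PHRASES if fam in fired]
-- ===== Notes on version B (the rewrite author's own statement) =====
-- stated objective: alternative
-- what changed: B first computes a set of fired measurement families from a flat trigger index, then produces the result in a single filter-and-substitute pass over one flat (family, phrase) table with the matched bone spliced into templates, instead of A's chain of if-blocks each appending its own hard-coded phrase list.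
import Mathlib
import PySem

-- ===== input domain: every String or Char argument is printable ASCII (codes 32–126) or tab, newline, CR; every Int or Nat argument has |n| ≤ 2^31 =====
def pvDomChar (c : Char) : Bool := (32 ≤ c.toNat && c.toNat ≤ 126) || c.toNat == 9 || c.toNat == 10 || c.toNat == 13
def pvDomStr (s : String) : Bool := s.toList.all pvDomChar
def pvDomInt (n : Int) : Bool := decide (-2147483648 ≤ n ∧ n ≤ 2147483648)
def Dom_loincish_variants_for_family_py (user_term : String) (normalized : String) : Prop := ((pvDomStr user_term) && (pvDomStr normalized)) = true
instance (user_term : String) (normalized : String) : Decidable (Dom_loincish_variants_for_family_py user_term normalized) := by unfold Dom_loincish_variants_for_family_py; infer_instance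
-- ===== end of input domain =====

-- B computes a fired-family set from a flat trigger index, then emits the result in one
-- filter-and-substitute pass over a flat (family, phrase) table; objective: alternative structure.


-- ===== PORT A =====
-- str.title() ported by hand for a single all-lowercase ASCII word (the only arguments it
-- receives here): uppercase the first character — exact on that domain.
def pyTitleWord (s : String) : String :=
  match s.toList with
  | [] => ""
  | c :: cs => String.ofList (PySem.Chars.upperChar c :: cs)

-- the 'for b in [...]: if …: terms += …; break' loop: returns the phrases added by the loop
def boneLoopA (ln lu : String) : List String → List String
  | [] => []
  | b :: rest =>
    if PySem.Str.isIn b ln || PySem.Str.isIn b lu then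
      [pyTitleWord b ++ " diaphysis fetus [Length] US", "Fetal " ++ b ++ " length [Length] US"]
    else boneLoopA ln lu rest

def loincish_variants_for_family_py (user_term : String) (normalized : String) : List String :=
  let terms : List String := []
  let ln := PySem.Str.lower normalized
  let lu := PySem.Str.lower user_term
  let terms := if PySem.Str.isIn "biparietal diameter" ln || PySem.Str.isIn "bpd" lu then
      terms ++ ["Head Diameter.biparietal [Length] fetus US",
                "Head biparietal diameter [Length] fetus US",
                "Fetal head biparietal diameter [Length] US"]
    else terms
  let terms := if PySem.Str.isIn "head circumference" ln || PySem.Str.isIn "hc" lu then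
      terms ++ ["Head [Circumference] fetus US"]
    else terms
  let terms := if PySem.Str.isIn "abdominal circumference" ln || PySem.Str.isIn "ac" lu then
      terms ++ ["Abdomen [Circumference] fetus US", "Abdominal circumference fetus US"]
    else terms
  let terms := terms ++ boneLoopA ln lu ["femur", "humerus", "radius", "ulna", "tibia", "fibula"]
  let terms := if PySem.Str.isIn "cerebellum" ln then
      terms ++ ["Cerebellum fetus [Diameter] US", "Cerebellum Diameter transverse fetus US"]
    else terms
  let terms := if PySem.Str.isIn "cisterna magna" ln then
      terms ++ ["Cisterna magna fetus [Diameter] US", "Fetal cisterna magna sagittal diameter US"]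
    else terms
  let terms := if PySem.Str.isIn "estimated fetal weight" ln || PySem.Str.isIn "efw" lu then
      terms ++ ["Estimated fetal weight [Mass] US", "Fetal body weight [Mass] US",
                "Fetus body weight [Mass] US", "EFW [Mass] US"]
    else terms
  let terms := if PySem.Str.isIn "fetal heart rate" ln || PySem.Str.isIn "fhr" lu then
      terms ++ ["Fetal heart rate [Rate] US", "Fetal heart rate US",
                "Fetal heart rate by auscultation", "Fetal heart rate mean 10 minutes",
                "Fetal heart rate reactivity"]
    else terms
  terms

-- ===== PORT B =====
-- flat trigger index: (substring, source, family); source true = lowered normalized ("n"), false = lowered user term ("u")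
def trigsB : List (String × Bool × String) :=
  [("biparietal diameter", true, "bpd"), ("bpd", false, "bpd"),
   ("head circumference", true, "hc"), ("hc", false, "hc"),
   ("abdominal circumference", true, "ac"), ("ac", false, "ac"),
   ("cerebellum", true, "cereb"),
   ("cisterna magna", true, "cm"),
   ("estimated fetal weight", true, "efw"), ("efw", false, "efw"),
   ("fetal heart rate", true, "fhr"), ("fhr", false, "fhr"),
   ("femur", true, "bone"), ("femur", false, "bone"),
   ("humerus", true, "bone"), ("humerus", false, "bone"),
   ("radius", true, "bone"), ("radius", false, "bone"),
   ("ulna", true, "bone"), ("ulna", false, "bone"),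
   ("tibia", true, "bone"), ("tibia", false, "bone"),
   ("fibula", true, "bone"), ("fibula", false, "bone")]

-- flat phrase table in emission order; bone phrases are templates over the matched bone
def phrasesB : List (String × String) :=
  [("bpd", "Head Diameter.biparietal [Length] fetus US"),
   ("bpd", "Head biparietal diameter [Length] fetus US"),
   ("bpd", "Fetal head biparietal diameter [Length] US"),
   ("hc", "Head [Circumference] fetus US"),
   ("ac", "Abdomen [Circumference] fetus US"),
   ("ac", "Abdominal circumference fetus US"),
   ("bone", "{T} diaphysis fetus [Length] US"),
   ("bone", "Fetal {b} length [Length] US"),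
   ("cereb", "Cerebellum fetus [Diameter] US"),
   ("cereb", "Cerebellum Diameter transverse fetus US"),
   ("cm", "Cisterna magna fetus [Diameter] US"),
   ("cm", "Fetal cisterna magna sagittal diameter US"),
   ("efw", "Estimated fetal weight [Mass] US"),
   ("efw", "Fetal body weight [Mass] US"),
   ("efw", "Fetus body weight [Mass] US"),
   ("efw", "EFW [Mass] US"),
   ("fhr", "Fetal heart rate [Rate] US"),
   ("fhr", "Fetal heart rate US"),
   ("fhr", "Fetal heart rate by auscultation"),
   ("fhr", "Fetal heart rate mean 10 minutes"),
   ("fhr", "Fetal heart rate reactivity")]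

def bonesB : List String := ["femur", "humerus", "radius", "ulna", "tibia", "fibula"]

def loincish_variants_for_family_py_alt (user_term : String) (normalized : String) : List String :=
  let ln := PySem.Str.lower normalized
  let lu := PySem.Str.lower user_term
  let fired : PySem.Set String := PySem.Set.ofList (trigsB.filterMap (fun t =>
      if PySem.Str.isIn t.1 (if t.2.1 then ln else lu) then some t.2.2 else none))
  let bone := (bonesB.find? (fun b => PySem.Str.isIn b ln || PySem.Str.isIn b lu)).getD ""
  (phrasesB.filter (fun e => PySem.Set.contains fired e.1)).map (fun e =>
    if e.1 == "bone" then
      PySem.Str.replace (PySem.Str.replace e.2 "{T}" (pyTitleWord bone)) "{b}" bone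
    else e.2)

-- ===== PRECONDITION & SPEC =====
def Spec_loincish_variants_for_family_py (user_term : String) (normalized : String) (out : List String) : Prop := out = loincish_variants_for_family_py_alt user_term normalized
instance (user_term : String) (normalized : String) (out : List String) : Decidable (Spec_loincish_variants_for_family_py user_term normalized out) := by unfold Spec_loincish_variants_for_family_py; infer_instance

-- ===== CLAIM (what is proved, stated in full; the proofs are below) =====
def Claim_equal_loincish_variants_for_family_py : Prop := ∀ (user_term : String) (normalized : String), Dom_loincish_variants_for_family_py user_term normalized → Spec_loincish_variants_for_family_py user_term normalized (loincish_variants_for_family_py user_term normalized)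

-- ===== LEMMAS AND PROOFS =====

theorem contains_ofList_eq {l : List String} {x : String} :
    PySem.Set.contains (PySem.Set.ofList l) x = l.contains x := by
  rw [Bool.eq_iff_iff]
  simp [PySem.Set.mem_ofList]

theorem filter_const {α : Type} (l : List α) (p : α → Bool) (b : Bool)
    (h : ∀ x ∈ l, p x = b) : l.filter p = if b then l else [] := by
  cases b
  · rw [List.filter_congr h]; simp
  · rw [List.filter_congr h]; simp

theorem if_append {α : Type} (c : Bool) (t x : List α) :
    (if c = true then t ++ x else t) = t ++ (if c = true then x else []) := by
  cases c <;> simp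

theorem map_if {α β : Type} (c : Bool) (l : List α) (f : α → β) :
    (if c = true then l else []).map f = if c = true then l.map f else [] := by
  cases c <;> simp

theorem boneLoopA_eq_find (ln lu : String) (bs : List String) :
    boneLoopA ln lu bs = match bs.find? (fun b => PySem.Str.isIn b ln || PySem.Str.isIn b lu) with
      | some b => [pyTitleWord b ++ " diaphysis fetus [Length] US",
                   "Fetal " ++ b ++ " length [Length] US"]
      | none => [] := by
  induction bs with
  | nil => simp [boneLoopA]
  | cons b rest ih =>
    rw [boneLoopA, List.find?_cons]
    cases (PySem.Str.isIn b ln || PySem.Str.isIn b lu)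
    · simp only [Bool.false_eq_true, if_false]
      exact ih
    · simp only [if_true]

-- the fired-family list of B, named for the proofs (the port writes it inline)
def firedB (ln lu : String) : List String :=
  trigsB.filterMap (fun t => if PySem.Str.isIn t.1 (if t.2.1 then ln else lu) then some t.2.2 else none)

set_option maxHeartbeats 1000000 in
theorem fired_bpd (ln lu : String) :
    (firedB ln lu).contains "bpd" = (PySem.Str.isIn "biparietal diameter" ln || PySem.Str.isIn "bpd" lu) := by
  rw [Bool.eq_iff_iff]
  simp [firedB, trigsB, List.mem_filterMap, Option.ite_none_right_eq_some]

set_option maxHeartbeats 1000000 in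
theorem fired_hc (ln lu : String) :
    (firedB ln lu).contains "hc" = (PySem.Str.isIn "head circumference" ln || PySem.Str.isIn "hc" lu) := by
  rw [Bool.eq_iff_iff]
  simp [firedB, trigsB, List.mem_filterMap, Option.ite_none_right_eq_some]

set_option maxHeartbeats 1000000 in
theorem fired_ac (ln lu : String) :
    (firedB ln lu).contains "ac" = (PySem.Str.isIn "abdominal circumference" ln || PySem.Str.isIn "ac" lu) := by
  rw [Bool.eq_iff_iff]
  simp [firedB, trigsB, List.mem_filterMap, Option.ite_none_right_eq_some]

set_option maxHeartbeats 1000000 in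
theorem fired_cereb (ln lu : String) :
    (firedB ln lu).contains "cereb" = PySem.Str.isIn "cerebellum" ln := by
  rw [Bool.eq_iff_iff]
  simp [firedB, trigsB, List.mem_filterMap, Option.ite_none_right_eq_some]

set_option maxHeartbeats 1000000 in
theorem fired_cm (ln lu : String) :
    (firedB ln lu).contains "cm" = PySem.Str.isIn "cisterna magna" ln := by
  rw [Bool.eq_iff_iff]
  simp [firedB, trigsB, List.mem_filterMap, Option.ite_none_right_eq_some]

set_option maxHeartbeats 1000000 in
theorem fired_efw (ln lu : String) :
    (firedB ln lu).contains "efw" = (PySem.Str.isIn "estimated fetal weight" ln || PySem.Str.isIn "efw" lu) := by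
  rw [Bool.eq_iff_iff]
  simp [firedB, trigsB, List.mem_filterMap, Option.ite_none_right_eq_some]

set_option maxHeartbeats 1000000 in
theorem fired_fhr (ln lu : String) :
    (firedB ln lu).contains "fhr" = (PySem.Str.isIn "fetal heart rate" ln || PySem.Str.isIn "fhr" lu) := by
  rw [Bool.eq_iff_iff]
  simp [firedB, trigsB, List.mem_filterMap, Option.ite_none_right_eq_some]

set_option maxHeartbeats 1000000 in
theorem fired_bone (ln lu : String) :
    (firedB ln lu).contains "bone" =
      (bonesB.find? (fun b => PySem.Str.isIn b ln || PySem.Str.isIn b lu)).isSome := by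
  rw [Bool.eq_iff_iff]
  simp [firedB, trigsB, bonesB, List.mem_filterMap, Option.ite_none_right_eq_some,
    List.find?_isSome]
  tauto

theorem bone_map1 (b : String) (hb : b ∈ bonesB) :
    PySem.Str.replace (PySem.Str.replace "{T} diaphysis fetus [Length] US" "{T}" (pyTitleWord b)) "{b}" b
      = pyTitleWord b ++ " diaphysis fetus [Length] US" := by
  fin_cases hb <;> decide

theorem bone_map2 (b : String) (hb : b ∈ bonesB) :
    PySem.Str.replace (PySem.Str.replace "Fetal {b} length [Length] US" "{T}" (pyTitleWord b)) "{b}" b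
      = "Fetal " ++ b ++ " length [Length] US" := by
  fin_cases hb <;> decide

set_option maxHeartbeats 1000000 in
theorem loincish_main (user_term normalized : String) :
    loincish_variants_for_family_py user_term normalized
      = loincish_variants_for_family_py_alt user_term normalized := by
  unfold loincish_variants_for_family_py loincish_variants_for_family_py_alt
  dsimp only
  generalize PySem.Str.lower normalized = ln
  generalize PySem.Str.lower user_term = lu
  rw [show (trigsB.filterMap (fun t => if PySem.Str.isIn t.1 (if t.2.1 then ln else lu) then some t.2.2 else none)) = firedB ln lu from rfl]
  -- split the phrase table into its family segments and push filter/map through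
  rw [show phrasesB =
      [(("bpd" : String), ("Head Diameter.biparietal [Length] fetus US" : String)),
       ("bpd", "Head biparietal diameter [Length] fetus US"),
       ("bpd", "Fetal head biparietal diameter [Length] US")] ++
      [(("hc" : String), ("Head [Circumference] fetus US" : String))] ++
      [(("ac" : String), ("Abdomen [Circumference] fetus US" : String)),
       ("ac", "Abdominal circumference fetus US")] ++
      [(("bone" : String), ("{T} diaphysis fetus [Length] US" : String)),
       ("bone", "Fetal {b} length [Length] US")] ++
      [(("cereb" : String), ("Cerebellum fetus [Diameter] US" : String)),
       ("cereb", "Cerebellum Diameter transverse fetus US")] ++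
      [(("cm" : String), ("Cisterna magna fetus [Diameter] US" : String)),
       ("cm", "Fetal cisterna magna sagittal diameter US")] ++
      [(("efw" : String), ("Estimated fetal weight [Mass] US" : String)),
       ("efw", "Fetal body weight [Mass] US"),
       ("efw", "Fetus body weight [Mass] US"),
       ("efw", "EFW [Mass] US")] ++
      [(("fhr" : String), ("Fetal heart rate [Rate] US" : String)),
       ("fhr", "Fetal heart rate US"),
       ("fhr", "Fetal heart rate by auscultation"),
       ("fhr", "Fetal heart rate mean 10 minutes"),
       ("fhr", "Fetal heart rate reactivity")] from rfl]
  simp only [List.filter_append, List.map_append]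
  rw [filter_const _ _ (PySem.Str.isIn "biparietal diameter" ln || PySem.Str.isIn "bpd" lu)
      (by rintro x hx; fin_cases hx <;> simp only [contains_ofList_eq, fired_bpd])]
  rw [filter_const _ _ (PySem.Str.isIn "head circumference" ln || PySem.Str.isIn "hc" lu)
      (by rintro x hx; fin_cases hx <;> simp only [contains_ofList_eq, fired_hc])]
  rw [filter_const _ _ (PySem.Str.isIn "abdominal circumference" ln || PySem.Str.isIn "ac" lu)
      (by rintro x hx; fin_cases hx <;> simp only [contains_ofList_eq, fired_ac])]
  rw [filter_const ([(("bone" : String), ("{T} diaphysis fetus [Length] US" : String)),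
       ("bone", "Fetal {b} length [Length] US")]) _
      ((bonesB.find? (fun b => PySem.Str.isIn b ln || PySem.Str.isIn b lu)).isSome)
      (by rintro x hx; fin_cases hx <;> simp only [contains_ofList_eq, fired_bone])]
  rw [filter_const _ _ (PySem.Str.isIn "cerebellum" ln)
      (by rintro x hx; fin_cases hx <;> simp only [contains_ofList_eq, fired_cereb])]
  rw [filter_const _ _ (PySem.Str.isIn "cisterna magna" ln)
      (by rintro x hx; fin_cases hx <;> simp only [contains_ofList_eq, fired_cm])]
  rw [filter_const _ _ (PySem.Str.isIn "estimated fetal weight" ln || PySem.Str.isIn "efw" lu)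
      (by rintro x hx; fin_cases hx <;> simp only [contains_ofList_eq, fired_efw])]
  rw [filter_const _ _ (PySem.Str.isIn "fetal heart rate" ln || PySem.Str.isIn "fhr" lu)
      (by rintro x hx; fin_cases hx <;> simp only [contains_ofList_eq, fired_fhr])]
  rw [boneLoopA_eq_find]
  rw [show (["femur", "humerus", "radius", "ulna", "tibia", "fibula"] : List String) = bonesB from rfl]
  repeat rw [if_append]
  rcases hf : (bonesB.find? (fun b => PySem.Str.isIn b ln || PySem.Str.isIn b lu)) with _ | b
  · simp only [Option.isSome_none, map_if, List.map_cons, List.map_nil, String.reduceBEq,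
      Bool.false_eq_true, reduceIte, List.nil_append, List.append_nil, List.append_assoc]
  · have hb := List.mem_of_find?_eq_some hf
    simp only [Option.isSome_some, Option.getD_some, map_if, List.map_cons, List.map_nil,
      String.reduceBEq, Bool.false_eq_true, reduceIte, List.nil_append,
      List.append_assoc, bone_map1 b hb, bone_map2 b hb]

-- ===== VERDICT (by name: the statement is the Claim_ definition above) =====
theorem loincish_variants_for_family_py_spec : Claim_equal_loincish_variants_for_family_py := by
  intro user_term normalized _
  exact loincish_main user_term normalized
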